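-- pv_equiv track=rewrite | github.com/ddierschow/bamca | bin/mbdata.py | find_vs_variations
-- ===== SOURCE A (Python) =====
-- def find_vs_variations(ents, sec_id, ran_id):
--     # given a list of ents with "vs.sec_id" and "vs.ran_id", give back the relevant ones
--     if sec_id and ran_id:
--         mods = [x for x in ents if x['vs.sec_id'] == sec_id and x['vs.ran_id'] == ran_id]
--         if mods:
--             return mods
--     if sec_id:
--         mods = [x for x in ents if x['vs.sec_id'] == sec_id]
--         if mods:
--             return mods
--     mods = [x for x in ents if x['vs.sec_id'] == '']
--     return mods
-- ===== SOURCE B (Python) =====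
-- def find_vs_variations(ents, sec_id, ran_id):
--     # One pass bucketing entries into empty/sec/exact lists, then pick by the same fallback priority.
--     empty, sec, exact = [], [], []
--     both = bool(sec_id) and bool(ran_id)
--     for x in ents:
--         sv = x['vs.sec_id']
--         if sv == '':
--             empty.append(x)
--         if sec_id and sv == sec_id:
--             sec.append(x)
--             if both and x['vs.ran_id'] == ran_id:
--                 exact.append(x)
--     if both and exact:
--         return exact
--     if sec_id and sec:
--         return sec
--     return empty
-- ===== Notes on version B (the rewrite author's own statement) =====
-- stated objective: alternative
-- what changed: B replaces A's up-to-three conditional filter passes over ents with a single loop that buckets each entry into empty/sec/exact accumulator lists and then picks one by the same fallback priority.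
import Mathlib
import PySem

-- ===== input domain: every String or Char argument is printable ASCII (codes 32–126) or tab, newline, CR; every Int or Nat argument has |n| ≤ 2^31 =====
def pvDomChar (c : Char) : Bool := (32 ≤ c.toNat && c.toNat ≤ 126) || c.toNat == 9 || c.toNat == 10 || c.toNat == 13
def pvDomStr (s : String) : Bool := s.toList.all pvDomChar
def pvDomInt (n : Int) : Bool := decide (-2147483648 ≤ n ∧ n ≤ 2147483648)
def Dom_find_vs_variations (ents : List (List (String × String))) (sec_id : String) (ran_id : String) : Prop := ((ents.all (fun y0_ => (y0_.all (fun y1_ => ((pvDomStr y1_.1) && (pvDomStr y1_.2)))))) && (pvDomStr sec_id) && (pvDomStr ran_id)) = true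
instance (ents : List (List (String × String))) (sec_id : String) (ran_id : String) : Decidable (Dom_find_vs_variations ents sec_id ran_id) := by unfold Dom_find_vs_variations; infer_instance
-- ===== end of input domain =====

-- B buckets the entries into empty/sec/exact lists in ONE pass instead of A's up-to-three filter passes;
-- same fallback priority, same result (alternative decomposition, no speed claim).

-- Shared helper: x[k] for an association-list dict, first match; exact when the key is present
-- (Pre_find_vs_variations guarantees presence exactly where the Python performs the lookup).
def pvGetS (x : List (String × String)) (k : String) : String :=
  ((x.find? (fun p => p.1 == k)).map Prod.snd).getD ""

-- ===== PORT A =====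
def find_vs_variations (ents : List (List (String × String))) (sec_id : String) (ran_id : String) : List (List (String × String)) :=
  -- the three comprehensions of A, picked by the same early-return conditions
  let modsX := ents.filter (fun x => pvGetS x "vs.sec_id" == sec_id && pvGetS x "vs.ran_id" == ran_id)
  let modsS := ents.filter (fun x => pvGetS x "vs.sec_id" == sec_id)
  let modsE := ents.filter (fun x => pvGetS x "vs.sec_id" == "")
  if sec_id ≠ "" ∧ ran_id ≠ "" ∧ modsX ≠ [] then modsX
  else if sec_id ≠ "" ∧ modsS ≠ [] then modsS
  else modsE

-- ===== PORT B =====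
-- the for-loop of B as structural recursion over the same (empty, sec, exact) state
def fvvLoop (sec_id ran_id : String) (both : Bool)
    (acc : List (List (String × String)) × List (List (String × String)) × List (List (String × String))) :
    List (List (String × String)) → List (List (String × String)) × List (List (String × String)) × List (List (String × String))
  | [] => acc
  | x :: xs =>
    let sv := pvGetS x "vs.sec_id"
    let e := if sv == "" then acc.1 ++ [x] else acc.1
    if sec_id != "" && sv == sec_id then
      let ex := if both && (pvGetS x "vs.ran_id" == ran_id) then acc.2.2 ++ [x] else acc.2.2
      fvvLoop sec_id ran_id both (e, acc.2.1 ++ [x], ex) xs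
    else fvvLoop sec_id ran_id both (e, acc.2.1, acc.2.2) xs

def find_vs_variations_alt (ents : List (List (String × String))) (sec_id : String) (ran_id : String) : List (List (String × String)) :=
  let both : Bool := sec_id != "" && ran_id != ""
  let acc := fvvLoop sec_id ran_id both ([], [], []) ents
  if both && !acc.2.2.isEmpty then acc.2.2
  else if sec_id != "" && !acc.2.1.isEmpty then acc.2.1
  else acc.1

-- ===== PRECONDITION & SPEC =====
-- Pre_ excludes exactly the inputs on which Python A raises KeyError: an entry without the
-- 'vs.sec_id' key, or (when both ids are nonempty) an entry matching sec_id without 'vs.ran_id'.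
def Pre_find_vs_variations (ents : List (List (String × String))) (sec_id : String) (ran_id : String) : Prop :=
  (∀ x ∈ ents, "vs.sec_id" ∈ x.map Prod.fst) ∧
  (sec_id ≠ "" → ran_id ≠ "" → ∀ x ∈ ents, pvGetS x "vs.sec_id" = sec_id → "vs.ran_id" ∈ x.map Prod.fst)
instance (ents : List (List (String × String))) (sec_id : String) (ran_id : String) : Decidable (Pre_find_vs_variations ents sec_id ran_id) := by unfold Pre_find_vs_variations; infer_instance

def pvWitness_find_vs_variations : (List (List (String × String))) × String × String :=
  ([[("vs.sec_id", "s1"), ("vs.ran_id", "r1")], [("vs.sec_id", "")]], "s1", "r1")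

def Spec_find_vs_variations (ents : List (List (String × String))) (sec_id : String) (ran_id : String) (out : List (List (String × String))) : Prop := out = find_vs_variations_alt ents sec_id ran_id
instance (ents : List (List (String × String))) (sec_id : String) (ran_id : String) (out : List (List (String × String))) : Decidable (Spec_find_vs_variations ents sec_id ran_id out) := by unfold Spec_find_vs_variations; infer_instance

-- ===== CLAIM (what is proved, stated in full; the proofs are below) =====
def Claim_equal_find_vs_variations : Prop := ∀ (ents : List (List (String × String))) (sec_id : String) (ran_id : String), Dom_find_vs_variations ents sec_id ran_id → Pre_find_vs_variations ents sec_id ran_id → Spec_find_vs_variations ents sec_id ran_id (find_vs_variations ents sec_id ran_id)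

-- ===== LEMMAS AND PROOFS =====

-- the loop of B returns the three filtered buckets appended to the accumulators
theorem fvv_loop_inv (sec_id ran_id : String) (both : Bool) (ents : List (List (String × String)))
    (e s ex : List (List (String × String))) :
    fvvLoop sec_id ran_id both (e, s, ex) ents
    = (e ++ ents.filter (fun x => pvGetS x "vs.sec_id" == ""),
       s ++ ents.filter (fun x => sec_id != "" && pvGetS x "vs.sec_id" == sec_id),
       ex ++ ents.filter (fun x => (sec_id != "" && pvGetS x "vs.sec_id" == sec_id) && (both && (pvGetS x "vs.ran_id" == ran_id)))) := by
  induction ents generalizing e s ex with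
  | nil => simp [fvvLoop]
  | cons x xs ih =>
    rw [fvvLoop]
    by_cases hs : (sec_id != "" && pvGetS x "vs.sec_id" == sec_id) = true
    · by_cases hr : (both && (pvGetS x "vs.ran_id" == ran_id)) = true
      · rw [if_pos hs, if_pos hr, ih]
        by_cases he : (pvGetS x "vs.sec_id" == "") = true <;>
          simp [hs, hr, he]
      · rw [if_pos hs, if_neg hr, ih]
        by_cases he : (pvGetS x "vs.sec_id" == "") = true <;>
          simp [hs, hr, he]
    · rw [if_neg hs, ih]
      by_cases he : (pvGetS x "vs.sec_id" == "") = true <;>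
        simp [hs, he]

-- ===== VERDICT (by name: the statement is the Claim_ definition above) =====
theorem find_vs_variations_spec : Claim_equal_find_vs_variations := by
  intro ents sec_id ran_id _ _
  unfold Spec_find_vs_variations find_vs_variations find_vs_variations_alt
  simp only [fvv_loop_inv, List.nil_append]
  by_cases hsec : sec_id = ""
  · subst hsec; simp
  · have h1 : (sec_id != "") = true := by simp [hsec]
    have hfs : (fun (x : List (String × String)) => sec_id != "" && pvGetS x "vs.sec_id" == sec_id)
        = (fun x => pvGetS x "vs.sec_id" == sec_id) := by
      funext x; rw [h1]; simp
    by_cases hran : ran_id = ""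
    · subst hran
      have hb : ((sec_id != "") && (("" : String) != "")) = false := by simp
      simp only [hb, Bool.false_and, Bool.and_false, List.filter_false, hfs,
        List.isEmpty_nil, Bool.not_true, Bool.false_eq_true, if_false, ne_eq, hsec,
        not_false_eq_true, true_and, false_and]
      split_ifs with h2 h3 <;> simp_all
    · have h2 : (ran_id != "") = true := by simp [hran]
      have hfx : (fun (x : List (String × String)) =>
            (sec_id != "" && pvGetS x "vs.sec_id" == sec_id) && ((sec_id != "" && ran_id != "") && (pvGetS x "vs.ran_id" == ran_id)))
          = (fun x => pvGetS x "vs.sec_id" == sec_id && pvGetS x "vs.ran_id" == ran_id) := by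
        funext x; rw [h1, h2]; simp
      rw [hfx, hfs]
      split_ifs with h3 h4 h5 h6 <;> simp_all
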